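-- pv_equiv track=rewrite | github.com/mcyprian/slide | slide/input.py | propagated
-- ===== SOURCE A (Python) =====
-- def propagated(var_name,calls):
-- # get a direction, in which the parameter is propagated
-- # -1 no propagation
-- # -2 multiple propagation
--     num=0
--     tp_return=("no_propagation",-1,-1)
--     for i in range(0,len(calls)):
--         p_name,params=calls[i]
--         occur=params.count(var_name)
--         if occur==1 and num==0:
--             num=1
--             tp_return=(p_name,i,params.index(var_name))
--         elif occur>=1: #multiple occurence
--             return ("multiple_propagation",-2,-2)
--     return tp_return
-- ===== SOURCE B (Python) =====
-- def propagated(var_name, calls):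
--     # Collect every call that mentions var_name in one pass, then classify.
--     hits = [(i, p_name, params)
--             for i, (p_name, params) in enumerate(calls)
--             if var_name in params]
--     if not hits:
--         return ("no_propagation", -1, -1)
--     if len(hits) > 1:
--         return ("multiple_propagation", -2, -2)
--     i, p_name, params = hits[0]
--     if params.count(var_name) > 1:
--         return ("multiple_propagation", -2, -2)
--     return (p_name, i, params.index(var_name))
-- ===== Notes on version B (the rewrite author's own statement) =====
-- stated objective: simpler
-- what changed: B replaces A's stateful loop (num flag, early return, mutable best tuple) by a collect-then-classify decomposition: one comprehension gathers all calls containing the variable, then a post-loop length/count check picks the result.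
import Mathlib
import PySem

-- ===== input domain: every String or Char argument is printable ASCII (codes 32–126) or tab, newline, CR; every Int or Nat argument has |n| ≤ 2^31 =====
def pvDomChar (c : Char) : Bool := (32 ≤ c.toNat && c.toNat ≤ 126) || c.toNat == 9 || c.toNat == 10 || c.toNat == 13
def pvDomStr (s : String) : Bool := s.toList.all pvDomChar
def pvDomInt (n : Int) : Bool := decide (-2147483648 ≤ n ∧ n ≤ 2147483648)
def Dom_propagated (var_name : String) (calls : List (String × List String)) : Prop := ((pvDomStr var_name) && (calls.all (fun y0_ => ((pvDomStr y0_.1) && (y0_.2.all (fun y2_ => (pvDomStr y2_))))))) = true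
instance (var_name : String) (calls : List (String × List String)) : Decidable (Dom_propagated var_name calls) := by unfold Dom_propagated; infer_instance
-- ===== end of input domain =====

-- B is a structurally different re-implementation (collect-then-classify instead of A's
-- stateful early-return loop); same cost, objective: simpler.

-- ===== PORT A =====
-- A's for-loop over range(0, len(calls)) carrying the mutable state (num, tp_return);
-- the early 'return' is the second branch.
def propagatedLoop (var_name : String) : List (String × List String) → Int → Int → (String × Int × Int) → String × Int × Int
  | [], _, _, tp => tp
  | (p_name, params) :: rest, i, num, tp =>
    let occur := PySem.List.count params var_name
    if occur = 1 ∧ num = 0 then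
      propagatedLoop var_name rest (i + 1) 1
        (p_name, i, (((PySem.List.index? params var_name).getD 0 : Nat) : Int))
    else if occur ≥ 1 then ("multiple_propagation", -2, -2)
    else propagatedLoop var_name rest (i + 1) num tp

def propagated (var_name : String) (calls : List (String × List String)) : String × Int × Int :=
  propagatedLoop var_name calls 0 0 ("no_propagation", -1, -1)

-- ===== PORT B =====
-- the comprehension: [(i, p_name, params) for i,(p_name,params) in enumerate(calls) if var_name in params]
def pvHits (var_name : String) (calls : List (String × List String)) : List (Int × String × List String) :=
  (PySem.List.enumerate calls).filterMap
    (fun e => if var_name ∈ e.2.2 then some (e.1, e.2.1, e.2.2) else none)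

-- the classification phase: empty / more than one / the single hit
def pvClassify (var_name : String) : List (Int × String × List String) → String × Int × Int
  | [] => ("no_propagation", -1, -1)
  | [(i, p_name, params)] =>
      if 1 < PySem.List.count params var_name then ("multiple_propagation", -2, -2)
      else (p_name, i, (((PySem.List.index? params var_name).getD 0 : Nat) : Int))
  | _ => ("multiple_propagation", -2, -2)

def propagated_alt (var_name : String) (calls : List (String × List String)) : String × Int × Int :=
  pvClassify var_name (pvHits var_name calls)

-- ===== PRECONDITION & SPEC =====
def Spec_propagated (var_name : String) (calls : List (String × List String)) (out : String × Int × Int) : Prop := out = propagated_alt var_name calls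
instance (var_name : String) (calls : List (String × List String)) (out : String × Int × Int) : Decidable (Spec_propagated var_name calls out) := by unfold Spec_propagated; infer_instance

-- ===== CLAIM (what is proved, stated in full; the proofs are below) =====
def Claim_equal_propagated : Prop := ∀ (var_name : String) (calls : List (String × List String)), Dom_propagated var_name calls → Spec_propagated var_name calls (propagated var_name calls)

-- ===== LEMMAS AND PROOFS =====

-- generalized hits from an arbitrary start index
lemma pvHits_cons (var_name p : String) (params : List String)
    (rest : List (String × List String)) (s : Int) :
    (PySem.List.enumerate ((p, params) :: rest) s).filterMap
      (fun e => if var_name ∈ e.2.2 then some (e.1, e.2.1, e.2.2) else none)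
    = (if var_name ∈ params then [(s, p, params)] else []) ++
      (PySem.List.enumerate rest (s + 1)).filterMap
        (fun e => if var_name ∈ e.2.2 then some (e.1, e.2.1, e.2.2) else none) := by
  rw [PySem.List.enumerate_cons]
  by_cases h : var_name ∈ params <;> simp [h]

-- in state num = 1 the loop returns tp iff no remaining call mentions the variable
lemma propagatedLoop_one (var_name : String) (l : List (String × List String))
    (i : Int) (tp : String × Int × Int) :
    propagatedLoop var_name l i 1 tp =
      if (PySem.List.enumerate l i).filterMap
          (fun e => if var_name ∈ e.2.2 then some (e.1, e.2.1, e.2.2) else none) = [] then tp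
      else ("multiple_propagation", -2, -2) := by
  induction l generalizing i with
  | nil => simp [propagatedLoop, PySem.List.enumerate_nil]
  | cons hd tl ih =>
    obtain ⟨p, params⟩ := hd
    rw [pvHits_cons]
    by_cases hm : var_name ∈ params
    · have hc : 1 ≤ List.count var_name params := by
        have := List.count_pos_iff.mpr hm; omega
      simp [propagatedLoop, PySem.List.count_eq, hm, hc]
    · have hc : List.count var_name params = 0 := List.count_eq_zero.mpr hm
      rw [if_neg hm, List.nil_append]
      simp [propagatedLoop, PySem.List.count_eq, hc, ih]

-- in the initial state the loop computes B's classification of the hits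
lemma propagatedLoop_zero (var_name : String) (l : List (String × List String)) (i : Int) :
    propagatedLoop var_name l i 0 ("no_propagation", -1, -1) =
      pvClassify var_name
        ((PySem.List.enumerate l i).filterMap
          (fun e => if var_name ∈ e.2.2 then some (e.1, e.2.1, e.2.2) else none)) := by
  induction l generalizing i with
  | nil => simp [propagatedLoop, PySem.List.enumerate_nil, pvClassify]
  | cons hd tl ih =>
    obtain ⟨p, params⟩ := hd
    rw [pvHits_cons]
    rcases Nat.lt_or_ge (List.count var_name params) 1 with hc | hc
    · -- occur = 0 : not a hit
      have hc0 : List.count var_name params = 0 := by omega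
      have hm : var_name ∉ params := List.count_eq_zero.mp hc0
      simp [propagatedLoop, PySem.List.count_eq, hc0, hm, ih]
    · have hm : var_name ∈ params := List.count_pos_iff.mp (by omega)
      rcases Nat.lt_or_ge 1 (List.count var_name params) with hg | hg
      · -- occur ≥ 2 : A returns multiple immediately
        have h1 : ¬ List.count var_name params = 1 := by omega
        cases htl : (PySem.List.enumerate tl (i + 1)).filterMap
            (fun e => if var_name ∈ e.2.2 then some (e.1, e.2.1, e.2.2) else none) with
        | nil => simp [propagatedLoop, PySem.List.count_eq, h1, hc, hm, pvClassify, hg]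
        | cons h t => simp [propagatedLoop, PySem.List.count_eq, h1, hc, hm, pvClassify]
      · -- occur = 1 : record the hit, continue in state num = 1
        have h1 : List.count var_name params = 1 := by omega
        rw [show (propagatedLoop var_name ((p, params) :: tl) i 0 ("no_propagation", -1, -1)) =
              propagatedLoop var_name tl (i + 1) 1
                (p, i, (((PySem.List.index? params var_name).getD 0 : Nat) : Int)) by
            simp [propagatedLoop, PySem.List.count_eq, h1]]
        rw [propagatedLoop_one]
        cases htl : (PySem.List.enumerate tl (i + 1)).filterMap
            (fun e => if var_name ∈ e.2.2 then some (e.1, e.2.1, e.2.2) else none) with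
        | nil => simp [hm, pvClassify, PySem.List.count_eq, h1]
        | cons h t => simp [hm, pvClassify]

-- ===== VERDICT (by name: the statement is the Claim_ definition above) =====
theorem propagated_spec : Claim_equal_propagated := by
  intro var_name calls _
  show propagated var_name calls = propagated_alt var_name calls
  rw [propagated, propagated_alt, pvHits, propagatedLoop_zero]
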